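-- pv_equiv track=rewrite | github.com/Game-prince/Tetris | src/functions.py | row_full
-- ===== SOURCE A (Python) =====
-- def row_full(all_blocks) -> bool :
--     """ checking if all the blocks int any row are full or not """
--     if len(all_blocks) == 0:
--         return False
--
--     curr = all_blocks[0]['y']
--     count = 0
--
--     for block in all_blocks:
--         if block['y'] == curr:
--             count += 1
--
--         else:
--             if (count == 10): return curr
--             count = 1
--             curr = block['y']
--
--     if count == 10:
--         return curr
--
--     return False
-- ===== SOURCE B (Python) =====
-- def row_full(all_blocks) -> bool:
--     """ checking if all the blocks int any row are full or not """
--     ys = [block['y'] for block in all_blocks]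
--
--     def go(ys):
--         # recurse group by group: measure the leading run, test it, drop it
--         if not ys:
--             return False
--         y = ys[0]
--         k = 1
--         while k < len(ys) and ys[k] == y:
--             k += 1
--         if k == 10:
--             return y
--         return go(ys[k:])
--
--     return go(ys)
-- ===== Notes on version B (the rewrite author's own statement) =====
-- stated objective: alternative
-- what changed: B recurses group by group over the y-sequence (measure the leading run of equal y's, test its length, drop it) instead of A's single for-loop carrying a running counter that is flushed when the y value changes and again after the loop; like A it returns the first exactly-10 run's y.
import Mathlib
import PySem

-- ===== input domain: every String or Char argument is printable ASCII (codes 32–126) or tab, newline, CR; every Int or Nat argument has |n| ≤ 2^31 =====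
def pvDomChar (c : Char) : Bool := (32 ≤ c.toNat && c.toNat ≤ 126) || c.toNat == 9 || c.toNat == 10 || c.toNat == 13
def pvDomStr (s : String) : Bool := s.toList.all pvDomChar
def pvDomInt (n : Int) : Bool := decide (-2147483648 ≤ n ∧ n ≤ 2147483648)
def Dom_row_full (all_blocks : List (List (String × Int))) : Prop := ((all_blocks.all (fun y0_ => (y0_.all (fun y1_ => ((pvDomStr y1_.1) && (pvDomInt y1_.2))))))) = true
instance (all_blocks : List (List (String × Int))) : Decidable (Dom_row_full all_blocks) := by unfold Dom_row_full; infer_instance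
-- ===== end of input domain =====

-- B recurses over the consecutive-equal-y groups (measure the leading run, test it, drop it)
-- instead of A's single fold with a running counter flushed on change; objective: alternative decomposition.
-- Both Pythons return the first exactly-10 run's y (an int) or False; under the bool return-type
-- convention the returned int is ported as its truth value, decide (y ≠ 0).

-- ===== PORT A =====
-- the for-loop over blocks with state (curr, count); the post-loop `if count == 10: return curr`
-- is the [] case; `return curr` (an int used as the declared bool) is ported as decide (curr ≠ 0);
-- block['y'] is PySem.Dict lookup, total via getD since Pre_row_full requires the key to be present
-- (Python raises KeyError otherwise).
def rowLoopA : List (List (String × Int)) → Int → Nat → Bool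
  | [], curr, count => if count == 10 then decide (curr ≠ 0) else false
  | b :: rest, curr, count =>
    let y := (PySem.Dict.mk b).getD "y" 0
    if y = curr then rowLoopA rest curr (count + 1)
    else if count == 10 then decide (curr ≠ 0)
    else rowLoopA rest y 1

def row_full (all_blocks : List (List (String × Int))) : Bool :=
  match all_blocks with
  | [] => false
  | b0 :: _ => rowLoopA all_blocks ((PySem.Dict.mk b0).getD "y" 0) 0

-- ===== PORT B =====
-- port of Source B's inner while loop: k = 1 + (length of the prefix of the tail equal to y)
def runLenB (y : Int) : List Int → Nat
  | [] => 0
  | z :: zs => if z = y then 1 + runLenB y zs else 0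

-- port of Source B's recursive go; ys[k:] with k ≥ 0 is exactly List.drop k; `return y` → decide (y ≠ 0)
def goB : List Int → Bool
  | [] => false
  | y :: rest =>
    let k := 1 + runLenB y rest
    if k == 10 then decide (y ≠ 0)
    else goB ((y :: rest).drop k)
termination_by ys => ys.length
decreasing_by simp

def row_full_alt (all_blocks : List (List (String × Int))) : Bool :=
  goB (all_blocks.map fun b => (PySem.Dict.mk b).getD "y" 0)

-- ===== PRECONDITION & SPEC =====
-- Pre_ excludes only blocks without a 'y' key, where both Pythons raise KeyError.
def Pre_row_full (all_blocks : List (List (String × Int))) : Prop :=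
  ∀ b ∈ all_blocks, ((PySem.Dict.mk b).get? "y").isSome = true
instance (all_blocks : List (List (String × Int))) : Decidable (Pre_row_full all_blocks) := by
  unfold Pre_row_full; infer_instance

def pvWitness_row_full : (List (List (String × Int))) := [[("y", 1)], [("y", 2)], [("y", 2)]]

def Spec_row_full (all_blocks : List (List (String × Int))) (out : Bool) : Prop := out = row_full_alt all_blocks
instance (all_blocks : List (List (String × Int))) (out : Bool) : Decidable (Spec_row_full all_blocks out) := by unfold Spec_row_full; infer_instance

-- ===== CLAIM (what is proved, stated in full; the proofs are below) =====
def Claim_equal_row_full : Prop := ∀ (all_blocks : List (List (String × Int))), Dom_row_full all_blocks → Pre_row_full all_blocks → Spec_row_full all_blocks (row_full all_blocks)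

-- ===== LEMMAS AND PROOFS =====

-- common characterisation: the (value, length) pairs of the consecutive-equal runs of `ys`,
-- with a run of `curr` of length `count` already open on the left
def runLensV : Int → Nat → List Int → List (Int × Nat)
  | curr, count, [] => [(curr, count)]
  | curr, count, y :: ys => if y = curr then runLensV curr (count + 1) ys else (curr, count) :: runLensV y 1 ys

theorem runLensV_cons (curr : Int) (count : Nat) (y : Int) (ys : List Int) :
    runLensV curr count (y :: ys) =
      if y = curr then runLensV curr (count + 1) ys else (curr, count) :: runLensV y 1 ys := rfl

def groupsV : List Int → List (Int × Nat)
  | [] => []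
  | y :: ys => runLensV y 1 ys

-- the common output: the truth value of the first run of length exactly 10, else false
def outOf (runs : List (Int × Nat)) : Bool :=
  match runs.find? (fun p => p.2 == 10) with
  | some p => decide (p.1 ≠ 0)
  | none => false

theorem runLensV_eq (ys : List Int) (curr : Int) (count : Nat) :
    runLensV curr count ys = (curr, count + runLenB curr ys) :: groupsV (ys.drop (runLenB curr ys)) := by
  induction ys generalizing curr count with
  | nil => simp [runLensV, runLenB, groupsV]
  | cons y ys ih =>
    by_cases h : y = curr
    · subst h
      simp only [runLensV, runLenB, if_pos]
      rw [ih]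
      simp [Nat.add_assoc, Nat.add_comm 1]
    · simp [runLensV, runLenB, h, groupsV]

theorem goB_eq_aux (n : Nat) : ∀ ys : List Int, ys.length ≤ n → goB ys = outOf (groupsV ys) := by
  induction n with
  | zero =>
    intro ys h
    match ys, h with
    | [], _ => simp [goB, groupsV, outOf]
  | succ n ih =>
    intro ys h
    match ys with
    | [] => simp [goB, groupsV, outOf]
    | y :: rest =>
      rw [goB]
      rw [show groupsV (y :: rest) = runLensV y 1 rest from rfl, runLensV_eq]
      by_cases h10 : 1 + runLenB y rest = 10
      · simp [h10, outOf]
      · rw [if_neg (by simpa using h10)]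
        rw [show (y :: rest).drop (1 + runLenB y rest) = rest.drop (runLenB y rest) from by
          simp [Nat.add_comm 1, List.drop_succ_cons]]
        rw [ih (rest.drop (runLenB y rest)) (by simp at h ⊢; omega)]
        have e : (1 + runLenB y rest == 10) = false := by simpa using h10
        simp [outOf, List.find?, e]

theorem goB_eq (ys : List Int) : goB ys = outOf (groupsV ys) :=
  goB_eq_aux ys.length ys le_rfl

theorem rowLoopA_eq (blocks : List (List (String × Int))) (curr : Int) (count : Nat) :
    rowLoopA blocks curr count =
      outOf (runLensV curr count (blocks.map fun b => (PySem.Dict.mk b).getD "y" 0)) := by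
  induction blocks generalizing curr count with
  | nil =>
    simp only [rowLoopA, List.map_nil, runLensV, outOf, List.find?]
    by_cases h : count = 10
    · simp [h]
    · have e : (count == 10) = false := by simpa using h
      simp [e]
  | cons b bs ih =>
    simp only [rowLoopA, List.map_cons]
    simp only [runLensV_cons]
    by_cases h : (PySem.Dict.mk b).getD "y" 0 = curr
    · rw [if_pos h, ih]
      simp [h]
    · by_cases h10 : count = 10
      · simp [h, h10, outOf]
      · rw [if_neg h, if_neg (by simpa using h10), ih]
        simp [outOf, h, h10]

-- ===== VERDICT (by name: the statement is the Claim_ definition above) =====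
theorem row_full_spec : Claim_equal_row_full := by
  intro all_blocks _ _
  unfold Spec_row_full
  cases all_blocks with
  | nil => simp [row_full, row_full_alt, goB]
  | cons b0 bs =>
    simp only [row_full, row_full_alt, List.map_cons]
    rw [rowLoopA_eq, goB_eq]
    simp [runLensV_cons, groupsV]
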